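-- pv_equiv track=rewrite | github.com/bitalizer/pyflashkit | flashkit/decompile/_helpers_full.py | _pop_n
-- ===== SOURCE A (Python) =====
-- from typing import Dict, List
--
-- def _pop_n(stack: List[str], n: int, error_log: List[str] = None, pos: str = '') -> List[str]:
--     """Pop n items from stack, reversed for argument order.
--
--     Args:
--         stack: The stack to pop from
--         n: Number of items to pop
--         error_log: Optional error log list to track stack underflow
--         pos: Optional position/context string for error messages
--
--     Returns:
--         List of popped items in argument order (reversed)
--     """
--     args = []
--     for _ in range(n):
--         if stack:
--             args.append(stack.pop())
--         else:
--             msg = f'Stack underflow (expected {n} items)'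
--             if pos:
--                 msg = f'{msg} at {pos}'
--             args.append('?')
--             if error_log is not None:
--                 error_log.append(msg)
--     args.reverse()
--     return args
-- ===== SOURCE B (Python) =====
-- from typing import Dict, List
--
-- def _pop_n(stack: List[str], n: int, error_log: List[str] = None, pos: str = '') -> List[str]:
--     """Pop n items from stack, reversed for argument order (closed-form: slice once instead of a pop loop)."""
--     available = min(n, len(stack)) if n > 0 else 0
--     underflow = n - available if n > 0 else 0
--     popped = stack[-available:] if available else []
--     del stack[len(stack) - available:]
--     if underflow and error_log is not None:
--         msg = f'Stack underflow (expected {n} items)'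
--         if pos:
--             msg = f'{msg} at {pos}'
--         error_log.extend([msg] * underflow)
--     return ['?'] * underflow + popped
-- ===== Notes on version B (the rewrite author's own statement) =====
-- stated objective: simpler
-- what changed: Replaces the n-iteration pop loop (with per-iteration emptiness checks and a final reverse) by a closed form: compute available/underflow once, take the popped items as a single slice and prepend the '?' padding directly, building the message once and extending the log underflow times.
import Mathlib
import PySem

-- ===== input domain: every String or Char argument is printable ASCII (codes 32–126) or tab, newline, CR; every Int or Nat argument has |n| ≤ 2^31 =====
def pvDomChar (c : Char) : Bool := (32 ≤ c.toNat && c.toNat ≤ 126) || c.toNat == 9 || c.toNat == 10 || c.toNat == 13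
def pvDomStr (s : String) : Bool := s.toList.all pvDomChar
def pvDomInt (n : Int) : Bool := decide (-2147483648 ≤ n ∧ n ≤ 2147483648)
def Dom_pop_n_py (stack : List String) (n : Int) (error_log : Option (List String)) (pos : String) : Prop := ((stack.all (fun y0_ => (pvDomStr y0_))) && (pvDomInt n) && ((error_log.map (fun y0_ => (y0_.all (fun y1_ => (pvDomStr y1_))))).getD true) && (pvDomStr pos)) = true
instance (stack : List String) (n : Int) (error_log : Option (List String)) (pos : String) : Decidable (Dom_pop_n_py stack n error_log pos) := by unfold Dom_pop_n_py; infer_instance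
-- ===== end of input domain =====

-- B replaces A's pop loop by a closed form (one slice + replicated padding); both Pythons also
-- mutate stack and error_log identically — the equivalence proved here is about the RETURN value.

-- ===== PORT A =====
-- one iteration of A's 'for _ in range(n)' body, on the state (stack, args)
def pvPopStep (st : List String × List String) : List String × List String :=
  match st with
  | ([], args) => ([], args ++ ["?"])
  | (y :: ys, args) => ((y :: ys).dropLast, args ++ [(y :: ys).getLast (by simp)])

def pop_n_py (stack : List String) (n : Int) (error_log : Option (List String)) (pos : String) : List String :=
  -- the loop also builds msg / appends to error_log; that is a side effect, not part of the return value
  (((PySem.List.pyRange 0 n 1).foldl (fun st _ => pvPopStep st) (stack, [])).2).reverse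

-- ===== PORT B =====
def pop_n_py_alt (stack : List String) (n : Int) (error_log : Option (List String)) (pos : String) : List String :=
  let available : Int := if 0 < n then min n (stack.length : Int) else 0
  let underflow : Int := if 0 < n then n - available else 0
  let popped : List String := if available ≠ 0 then PySem.List.slice stack (some (-available)) none else []
  List.replicate underflow.toNat "?" ++ popped

-- ===== PRECONDITION & SPEC =====
def Spec_pop_n_py (stack : List String) (n : Int) (error_log : Option (List String)) (pos : String) (out : List String) : Prop := out = pop_n_py_alt stack n error_log pos
instance (stack : List String) (n : Int) (error_log : Option (List String)) (pos : String) (out : List String) : Decidable (Spec_pop_n_py stack n error_log pos out) := by unfold Spec_pop_n_py; infer_instance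

-- ===== CLAIM (what is proved, stated in full; the proofs are below) =====
def Claim_equal_pop_n_py : Prop := ∀ (stack : List String) (n : Int) (error_log : Option (List String)) (pos : String), Dom_pop_n_py stack n error_log pos → Spec_pop_n_py stack n error_log pos (pop_n_py stack n error_log pos)

-- ===== LEMMAS AND PROOFS =====

-- the fold ignores the range elements: it is k-fold iteration of pvPopStep
lemma foldl_pvPopStep_eq_iterate (l : List Int) (st : List String × List String) :
    l.foldl (fun st _ => pvPopStep st) st = pvPopStep^[l.length] st := by
  induction l generalizing st with
  | nil => rfl
  | cons x xs ih => simp [List.foldl_cons, ih, Function.iterate_succ_apply]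

lemma drop_reverse_cons (s : List String) (h : s ≠ []) (k : Nat) :
    (List.drop (s.length - (k + 1)) s).reverse
      = s.getLast h :: (List.drop (s.dropLast.length - k) s.dropLast).reverse := by
  conv_lhs => rw [← List.dropLast_concat_getLast h]
  rw [List.drop_append_of_le_length (by simp)]
  simp [List.length_dropLast]

lemma iterate_pvPopStep (k : Nat) (s args : List String) :
    (pvPopStep^[k] (s, args)).2
      = args ++ (List.drop (s.length - k) s).reverse ++ List.replicate (k - s.length) "?" := by
  induction k generalizing s args with
  | zero => simp
  | succ k ih =>
    rw [Function.iterate_succ_apply]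
    match s with
    | [] =>
      simp only [pvPopStep, ih]
      simp [List.replicate_succ]
    | y :: ys =>
      have hne : (y :: ys) ≠ [] := by simp
      simp only [pvPopStep, ih]
      rw [drop_reverse_cons (y :: ys) hne k]
      have hrep : (k + 1) - (y :: ys).length = k - (y :: ys).dropLast.length := by
        simp
      rw [hrep]
      simp

lemma pop_n_py_closed (stack : List String) (n : Int) (el : Option (List String)) (pos : String) :
    pop_n_py stack n el pos
      = List.replicate (n.toNat - stack.length) "?"
          ++ List.drop (stack.length - n.toNat) stack := by
  unfold pop_n_py
  rw [foldl_pvPopStep_eq_iterate, PySem.List.length_pyRange_one, iterate_pvPopStep]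
  simp

lemma pop_n_py_alt_closed (stack : List String) (n : Int) (el : Option (List String)) (pos : String) :
    pop_n_py_alt stack n el pos
      = List.replicate (n.toNat - stack.length) "?"
          ++ List.drop (stack.length - n.toNat) stack := by
  unfold pop_n_py_alt
  by_cases hn : 0 < n
  · simp only [if_pos hn]
    by_cases ha : min n (stack.length : Int) = 0
    · have hs : stack = [] := List.length_eq_zero_iff.mp (by omega)
      subst hs
      simp only [List.length_nil, Nat.cast_zero, min_eq_right hn.le, neg_zero]
      simp
    · have hle : min n (stack.length : Int) ≤ (stack.length : Int) := min_le_right _ _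
      rw [if_pos ha, PySem.List.slice_some_none]
      have hcast : -(min n (stack.length : Int)) = -(((min n (stack.length : Int)).toNat : Nat) : Int) := by
        omega
      rw [hcast, PySem.List.clampIdx_neg_natCast _ _ (by omega)]
      have h1 : (n - min n (stack.length : Int)).toNat = n.toNat - stack.length := by omega
      have h2 : stack.length - (min n (stack.length : Int)).toNat = stack.length - n.toNat := by omega
      rw [h1, h2]
  · have h0 : n.toNat = 0 := by omega
    simp [hn, h0]

-- ===== VERDICT (by name: the statement is the Claim_ definition above) =====
theorem pop_n_py_spec : Claim_equal_pop_n_py := by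
  intro stack n el pos _
  unfold Spec_pop_n_py
  rw [pop_n_py_closed, pop_n_py_alt_closed]
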